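-- pv_equiv track=rewrite | github.com/TB-AD/TB-Bench | evaluation/evaluate_functions.py | other_turning_score
-- ===== SOURCE A (Python) =====
-- def other_turning_score(pred, short_gt):
--     left_turn_list = ['turn left', 'turns left', 'left turn', 'left-turn maneuver', 'turn left maneuver', 'turns left maneuver', 'turning left']
--     right_turn_list = ['turn right', 'turns right', 'right turn', 'right-turn maneuver', 'turn right maneuver', 'turns right maneuver', 'turning right']
--     go_straight_list = ['go straight', 'no turn', 'no turns', 'no turning', 'no turning maneuver', 'proceeds directly ahead']
--
--     left_turn_matches = 1 if sum(word in pred for word in left_turn_list) >= 1 else 0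
--     right_turn_matches = 1 if sum(word in pred for word in right_turn_list) >= 1 else 0
--     go_straight_matches = 1 if sum(word in pred for word in go_straight_list) >= 1 else 0
--
--     total_matches = left_turn_matches + right_turn_matches + go_straight_matches
--     # Check for cheating or multiple matches
--     if total_matches != 1:
--         return 0  # Multiple matches or no match indicates cheating or incorrect prediction
--
--     if short_gt == 'left_turn':
--         return 1 if left_turn_matches == 1 else 0
--     elif short_gt == 'right_turn':
--         return 1 if right_turn_matches == 1 else 0
--     elif short_gt == 'go_straight':
--         return 1 if go_straight_matches == 1 else 0
--     return 0
-- ===== SOURCE B (Python) =====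
-- PHRASES = [(p, cat) for cat, ps in [
--     ('left_turn', ['turn left', 'turns left', 'left turn', 'left-turn maneuver', 'turn left maneuver', 'turns left maneuver', 'turning left']),
--     ('right_turn', ['turn right', 'turns right', 'right turn', 'right-turn maneuver', 'turn right maneuver', 'turns right maneuver', 'turning right']),
--     ('go_straight', ['go straight', 'no turn', 'no turns', 'no turning', 'no turning maneuver', 'proceeds directly ahead']),
-- ] for p in ps]
--
-- def other_turning_score(pred, short_gt):
--     # single pass over the flat phrase table with an early-exit state machine:
--     # `found` is the unique category matched so far (None if none yet);
--     # a match in a second distinct category short-circuits to 0.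
--     found = None
--     for phrase, cat in PHRASES:
--         if phrase in pred and cat != found:
--             if found is not None:
--                 return 0
--             found = cat
--     return 1 if found == short_gt else 0
-- ===== Notes on version B (the rewrite author's own statement) =====
-- stated objective: simpler
-- what changed: Replaced A's three staged indicator-sum scans, the total_matches counter and the if/elif dispatch by a single pass over a flat (phrase, category) table driving an early-exit state machine that tracks the unique matched category and short-circuits to 0 on a second distinct match, finishing with one comparison against short_gt.
import Mathlib
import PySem

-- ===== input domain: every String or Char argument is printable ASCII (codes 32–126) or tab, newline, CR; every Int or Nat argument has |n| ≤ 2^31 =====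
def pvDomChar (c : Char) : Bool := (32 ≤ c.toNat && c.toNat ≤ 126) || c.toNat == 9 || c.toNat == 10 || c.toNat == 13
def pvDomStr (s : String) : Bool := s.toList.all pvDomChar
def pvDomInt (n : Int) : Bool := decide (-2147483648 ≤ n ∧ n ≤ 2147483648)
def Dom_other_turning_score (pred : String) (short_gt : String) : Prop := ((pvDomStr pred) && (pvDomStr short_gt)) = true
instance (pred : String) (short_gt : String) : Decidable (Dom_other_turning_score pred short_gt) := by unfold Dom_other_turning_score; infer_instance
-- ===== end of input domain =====

-- B replaces A's three staged indicator-sum scans, match counter and if/elif dispatch by a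
-- single pass over a flat (phrase, category) table with an early-exit state machine
-- (objective: simpler).

-- ===== PORT A =====
def leftTurnList : List String := ["turn left", "turns left", "left turn", "left-turn maneuver", "turn left maneuver", "turns left maneuver", "turning left"]
def rightTurnList : List String := ["turn right", "turns right", "right turn", "right-turn maneuver", "turn right maneuver", "turns right maneuver", "turning right"]
def goStraightList : List String := ["go straight", "no turn", "no turns", "no turning", "no turning maneuver", "proceeds directly ahead"]

def other_turning_score (pred : String) (short_gt : String) : Int :=
  let left_turn_matches : Int :=
    if (leftTurnList.map (fun word => if PySem.Str.isIn word pred then (1 : Int) else 0)).sum ≥ 1 then 1 else 0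
  let right_turn_matches : Int :=
    if (rightTurnList.map (fun word => if PySem.Str.isIn word pred then (1 : Int) else 0)).sum ≥ 1 then 1 else 0
  let go_straight_matches : Int :=
    if (goStraightList.map (fun word => if PySem.Str.isIn word pred then (1 : Int) else 0)).sum ≥ 1 then 1 else 0
  let total_matches := left_turn_matches + right_turn_matches + go_straight_matches
  if total_matches ≠ 1 then 0
  else if short_gt = "left_turn" then (if left_turn_matches = 1 then 1 else 0)
  else if short_gt = "right_turn" then (if right_turn_matches = 1 then 1 else 0)
  else if short_gt = "go_straight" then (if go_straight_matches = 1 then 1 else 0)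
  else 0

-- ===== PORT B =====
-- flat (phrase, category) table, built as in Source B
def phraseTable : List (String × String) :=
  ([("left_turn", ["turn left", "turns left", "left turn", "left-turn maneuver", "turn left maneuver", "turns left maneuver", "turning left"]),
    ("right_turn", ["turn right", "turns right", "right turn", "right-turn maneuver", "turn right maneuver", "turns right maneuver", "turning right"]),
    ("go_straight", ["go straight", "no turn", "no turns", "no turning", "no turning maneuver", "proceeds directly ahead"])]
   : List (String × List String)).flatMap (fun cp => cp.2.map (fun p => (p, cp.1)))

-- the loop of Source B: `none` result = early `return 0`, `some found` = loop finished with state `found`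
def scanPhrases (pred : String) : List (String × String) → Option String → Option (Option String)
  | [], found => some found
  | (phrase, cat) :: rest, found =>
      if PySem.Str.isIn phrase pred && !(found == some cat) then
        if found ≠ none then none
        else scanPhrases pred rest (some cat)
      else scanPhrases pred rest found

def other_turning_score_alt (pred : String) (short_gt : String) : Int :=
  match scanPhrases pred phraseTable none with
  | none => 0
  | some found => if found = some short_gt then 1 else 0

-- ===== PRECONDITION & SPEC =====
def Spec_other_turning_score (pred : String) (short_gt : String) (out : Int) : Prop := out = other_turning_score_alt pred short_gt
instance (pred : String) (short_gt : String) (out : Int) : Decidable (Spec_other_turning_score pred short_gt out) := by unfold Spec_other_turning_score; infer_instance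

-- ===== CLAIM (what is proved, stated in full; the proofs are below) =====
def Claim_equal_other_turning_score : Prop := ∀ (pred : String) (short_gt : String), Dom_other_turning_score pred short_gt → Spec_other_turning_score pred short_gt (other_turning_score pred short_gt)

-- ===== LEMMAS AND PROOFS =====

-- A's 0/1 indicator sum is ≥ 1 exactly when some phrase matches
theorem sum_indicator_ge_one (pred : String) (ws : List String) :
    ((ws.map (fun word => if PySem.Str.isIn word pred then (1 : Int) else 0)).sum ≥ 1)
      ↔ ws.any (fun p => PySem.Str.isIn p pred) = true := by
  rw [PySem.List.sum_map_ite_one_zero, List.any_eq_true, ← List.countP_pos_iff]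
  omega

-- scanning a block of phrases that all carry the same category
theorem scan_block (pred : String) (c : String) (ps : List String) (found : Option String) :
    scanPhrases pred (ps.map (fun p => (p, c))) found =
      if ps.any (fun p => PySem.Str.isIn p pred) then
        (match found with
         | none => some (some c)
         | some d => if d = c then some (some d) else none)
      else some found := by
  induction ps generalizing found with
  | nil => simp [scanPhrases]
  | cons p rest ih =>
    simp only [List.map_cons, scanPhrases, List.any_cons]
    by_cases h : PySem.Str.isIn p pred = true <;>
    by_cases hr : (rest.any fun q => PySem.Str.isIn q pred) = true <;>
    cases found <;> simp_all

-- early return propagates through the second part of the table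
theorem scan_append (pred : String) (l1 l2 : List (String × String)) (found : Option String) :
    scanPhrases pred (l1 ++ l2) found =
      (scanPhrases pred l1 found).bind (scanPhrases pred l2) := by
  induction l1 generalizing found with
  | nil => simp [scanPhrases]
  | cons pc rest ih =>
    obtain ⟨phrase, cat⟩ := pc
    simp only [List.cons_append, scanPhrases]
    split_ifs with h1 h2 <;> simp_all

theorem other_turning_score_eq_alt (pred short_gt : String) :
    other_turning_score pred short_gt = other_turning_score_alt pred short_gt := by
  unfold other_turning_score other_turning_score_alt
  rw [show phraseTable =
      (leftTurnList.map (fun p => (p, "left_turn"))) ++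
      ((rightTurnList.map (fun p => (p, "right_turn"))) ++
       (goStraightList.map (fun p => (p, "go_straight")))) from rfl]
  simp only [sum_indicator_ge_one]
  by_cases hL : leftTurnList.any (fun p => PySem.Str.isIn p pred) = true <;>
  by_cases hR : rightTurnList.any (fun p => PySem.Str.isIn p pred) = true <;>
  by_cases hG : goStraightList.any (fun p => PySem.Str.isIn p pred) = true <;>
  simp only [hL, hR, hG, scan_append, scan_block, if_true, if_false, Bool.false_eq_true,
    Option.bind] <;>
  by_cases h1 : short_gt = "left_turn" <;> by_cases h2 : short_gt = "right_turn" <;>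
  by_cases h3 : short_gt = "go_straight" <;> simp_all <;>
  first | exact fun h => h1 h.symm | exact fun h => h2 h.symm | exact fun h => h3 h.symm

-- ===== VERDICT (by name: the statement is the Claim_ definition above) =====
theorem other_turning_score_spec : Claim_equal_other_turning_score := by
  intro pred short_gt _
  exact other_turning_score_eq_alt pred short_gt
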